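-- pv_equiv track=rewrite | github.com/nuoHep/simc_support | simc_support/wow_lib.py | is_talent_combination
-- ===== SOURCE A (Python) =====
-- def is_talent_combination(talent_combination):
--   """Check the talent_combination for valid format.
--
--   Arguments:
--     talent_combination {str} -- [description]
--
--   Returns:
--     bool -- True, if the format matches the required format of get_talent_combinations
--   """
--
--   if talent_combination == None:
--     return False
--   if not type(talent_combination) is str:
--     return False
--   if talent_combination == "":
--     return True
--   if len(talent_combination) == 7:
--     for letter in talent_combination:
--       if not (
--         letter == "0" or letter == "1" or letter == "2" or letter == "3" or
--         letter == "-" or letter == "x"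
--       ):
--         return False
--     return True
--   elif len(talent_combination) == 2:
--     for letter in talent_combination:
--       if not (
--         letter == "0" or letter == "1" or letter == "2" or letter == "3"
--       ):
--         return False
--     return True
--   # Would've been for talent combinations that set certain rows to a value without declaring anything else.
--   # Like 42 would set the forth row to the second talent. 4253 would set 4. row to 2 and 5. to 3
--   #elif len(talent_combination) % 2 == 0:
--   #  for i in range(0, len(talent_combination)):
--   #    if (i + 1) % 2 == 1 and not int(talent_combination[i]) in range(1,8):
--   #      return False
--   #    elif not int(talent_combination[i]) in range(0,4):
--   #      return False
--   #  return True
--   else: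
--     return False
-- ===== SOURCE B (Python) =====
-- def _eat(s, alphabet, k):
--     """Consume exactly k characters, each from `alphabet`; return the rest of
--     the string, or None if matching fails."""
--     if k == 0:
--         return s
--     if s and s[0] in alphabet:
--         return _eat(s[1:], alphabet, k - 1)
--     return None
--
--
-- def is_talent_combination(talent_combination):
--     """Check the talent_combination for valid format.
--
--     Recursive-descent matcher of the grammar:  '' | [0-3x-]{7} | [0-3]{2}
--     """
--     if not isinstance(talent_combination, str):
--         return False
--     return (talent_combination == ""
--             or _eat(talent_combination, "0123-x", 7) == ""
--             or _eat(talent_combination, "0123", 2) == "")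
-- ===== Notes on version B (the rewrite author's own statement) =====
-- stated objective: alternative
-- what changed: Replaces A's length dispatch with per-branch scanning loops by a recursive-descent matcher of the grammar (empty | [0-3x-]{7} | [0-3]{2}) that consumes characters one at a time and never computes the length.
import Mathlib
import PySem

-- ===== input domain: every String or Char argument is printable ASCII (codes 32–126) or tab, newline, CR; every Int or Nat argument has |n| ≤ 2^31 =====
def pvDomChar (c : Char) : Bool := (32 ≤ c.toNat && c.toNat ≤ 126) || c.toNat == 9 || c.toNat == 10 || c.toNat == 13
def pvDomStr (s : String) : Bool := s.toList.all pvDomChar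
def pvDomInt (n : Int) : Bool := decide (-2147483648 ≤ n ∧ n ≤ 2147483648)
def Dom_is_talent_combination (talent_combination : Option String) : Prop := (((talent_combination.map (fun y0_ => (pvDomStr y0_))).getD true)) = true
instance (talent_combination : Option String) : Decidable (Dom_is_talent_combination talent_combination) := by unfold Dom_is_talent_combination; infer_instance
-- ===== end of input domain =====

-- B replaces A's length-dispatch with per-branch loops by a recursive-descent matcher of the grammar (empty | [0-3x-]{7} | [0-3]{2}) (alternative decomposition, same cost).


-- ===== PORT A =====
-- the `for letter in …` loop of the length-7 branch (early return False on a bad char)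
def pvLoop7 : List Char → Bool
  | [] => true
  | c :: rest =>
    if !(c == '0' || c == '1' || c == '2' || c == '3' || c == '-' || c == 'x') then false
    else pvLoop7 rest

-- the `for letter in …` loop of the length-2 branch
def pvLoop2 : List Char → Bool
  | [] => true
  | c :: rest =>
    if !(c == '0' || c == '1' || c == '2' || c == '3') then false
    else pvLoop2 rest

def is_talent_combination (talent_combination : Option String) : Bool :=
  match talent_combination with
  | none => false            -- `talent_combination == None` / non-str guards
  | some s =>
    if s == "" then true
    else if PySem.Str.len s == 7 then pvLoop7 s.toList
    else if PySem.Str.len s == 2 then pvLoop2 s.toList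
    else false

-- ===== PORT B =====
-- `_eat`: consume exactly k characters from `alphabet`, return the remainder (none = failure)
def pvEat (s : List Char) (alphabet : List Char) (k : Nat) : Option (List Char) :=
  if k = 0 then some s
  else
    match s with
    | c :: rest => if alphabet.contains c then pvEat rest alphabet (k - 1) else none
    | [] => none

def is_talent_combination_alt (talent_combination : Option String) : Bool :=
  match talent_combination with
  | none => false            -- isinstance guard
  | some s =>
    (s.toList == [])
      || (pvEat s.toList ("0123-x").toList 7 == some [])
      || (pvEat s.toList ("0123").toList 2 == some [])

-- ===== PRECONDITION & SPEC =====
def Spec_is_talent_combination (talent_combination : Option String) (out : Bool) : Prop := out = is_talent_combination_alt talent_combination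
instance (talent_combination : Option String) (out : Bool) : Decidable (Spec_is_talent_combination talent_combination out) := by unfold Spec_is_talent_combination; infer_instance

-- ===== CLAIM (what is proved, stated in full; the proofs are below) =====
def Claim_equal_is_talent_combination : Prop := ∀ (talent_combination : Option String), Dom_is_talent_combination talent_combination → Spec_is_talent_combination talent_combination (is_talent_combination talent_combination)

-- ===== LEMMAS AND PROOFS =====

theorem pvBeq_empty (s : String) : (s == "") = (s.toList == []) := by
  rw [Bool.eq_iff_iff]; simp only [beq_iff_eq, ← String.toList_inj]; simp

theorem pvMem6 (c : Char) :
    (("0123-x").toList).contains c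
      = (c == '0' || c == '1' || c == '2' || c == '3' || c == '-' || c == 'x') := by
  show (['0','1','2','3','-','x']).contains c = _
  simp only [List.contains_cons, List.contains_nil, Bool.or_false]
  ac_rfl

theorem pvMem4 (c : Char) :
    (("0123").toList).contains c
      = (c == '0' || c == '1' || c == '2' || c == '3') := by
  show (['0','1','2','3']).contains c = _
  simp only [List.contains_cons, List.contains_nil, Bool.or_false]
  ac_rfl

-- pvEat succeeds with an empty remainder exactly on strings of length k over the alphabet
theorem pvEat_some_nil (alpha : List Char) (k : Nat) (l : List Char) :
    (pvEat l alpha k == some []) = ((l.length == k) && l.all (fun c => alpha.contains c)) := by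
  induction k generalizing l with
  | zero =>
    cases l with
    | nil => rfl
    | cons c rest => simp [pvEat]
  | succ k ih =>
    cases l with
    | nil => simp [pvEat]
    | cons c rest =>
      by_cases h : c ∈ alpha
      · simp [pvEat, h, ih, Bool.and_left_comm]
      · simp [pvEat, h]

theorem pvLoop7_all (l : List Char) :
    pvLoop7 l = l.all (fun c => ("0123-x").toList.contains c) := by
  induction l with
  | nil => rfl
  | cons c rest ih =>
    simp only [pvLoop7, List.all_cons, pvMem6, ih]
    by_cases h : (c == '0' || c == '1' || c == '2' || c == '3' || c == '-' || c == 'x') = true <;>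
      simp [h]

theorem pvLoop2_all (l : List Char) :
    pvLoop2 l = l.all (fun c => ("0123").toList.contains c) := by
  induction l with
  | nil => rfl
  | cons c rest ih =>
    simp only [pvLoop2, List.all_cons, pvMem4, ih]
    by_cases h : (c == '0' || c == '1' || c == '2' || c == '3') = true <;>
      simp [h]

-- ===== VERDICT (by name: the statement is the Claim_ definition above) =====
theorem is_talent_combination_spec : Claim_equal_is_talent_combination := by
  intro t _
  unfold Spec_is_talent_combination
  match t with
  | none => rfl
  | some s =>
    show (if s == "" then true
          else if PySem.Str.len s == 7 then pvLoop7 s.toList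
          else if PySem.Str.len s == 2 then pvLoop2 s.toList
          else false)
        = ((s.toList == [])
            || (pvEat s.toList ("0123-x").toList 7 == some [])
            || (pvEat s.toList ("0123").toList 2 == some []))
    rw [pvBeq_empty, PySem.Str.len_eq, pvEat_some_nil, pvEat_some_nil]
    by_cases h0 : s.toList.length = 0
    · have he : s.toList = [] := List.length_eq_zero_iff.mp h0
      rw [he]; rfl
    · have hne : (s.toList == []) = false := by
        rw [beq_eq_false_iff_ne]; intro h; exact h0 (by simp [h])
      simp only [hne, Bool.false_eq_true, if_false, Bool.false_or]
      by_cases h7 : s.toList.length = 7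
      · have k7i : (((s.toList.length : Nat) : Int) == 7) = true := by simp [h7]
        have k7n : ((s.toList.length : Nat) == 7) = true := by simp [h7]
        have k2n : ((s.toList.length : Nat) == 2) = false := by rw [beq_eq_false_iff_ne]; omega
        simp only [k7i, if_true, k7n, k2n, Bool.true_and, Bool.false_and, Bool.or_false]
        exact pvLoop7_all _
      · have k7i : (((s.toList.length : Nat) : Int) == 7) = false := by
          rw [beq_eq_false_iff_ne]; exact_mod_cast h7
        have k7n : ((s.toList.length : Nat) == 7) = false := by rw [beq_eq_false_iff_ne]; exact h7
        simp only [k7i, Bool.false_eq_true, if_false, k7n, Bool.false_and, Bool.false_or]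
        by_cases h2 : s.toList.length = 2
        · have k2i : (((s.toList.length : Nat) : Int) == 2) = true := by simp [h2]
          have k2n : ((s.toList.length : Nat) == 2) = true := by simp [h2]
          simp only [k2i, if_true, k2n, Bool.true_and]
          exact pvLoop2_all _
        · have k2i : (((s.toList.length : Nat) : Int) == 2) = false := by
            rw [beq_eq_false_iff_ne]; exact_mod_cast h2
          have k2n : ((s.toList.length : Nat) == 2) = false := by rw [beq_eq_false_iff_ne]; exact h2
          simp only [k2i, Bool.false_eq_true, if_false, k2n, Bool.false_and]
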